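-- pv_equiv track=rewrite | github.com/homebrew9/leetcode_solutions | algorithms/medium/maximum_number_of_matching_indices_after_right_shifts.py | maximumMatchingIndices_1
-- ===== SOURCE A (Python) =====
-- from typing import List
-- from collections import defaultdict
--
-- def maximumMatchingIndices_1(nums1: List[int], nums2: List[int]) -> int:
--     indices1 = defaultdict(list)
--     for i, v in enumerate(nums1):
--         indices1[v] += [i]
--     indices2 = defaultdict(list)
--     for i, v in enumerate(nums2):
--         indices2[v] += [i]
--     N = len(nums1)
--     # matches[i] is the number of matches after i shifts
--     matches = [0 for _ in range(N)]
--     for num in indices1: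
--         for i1 in indices1[num]:
--             for i2 in indices2[num]:
--                 matches[(i2 - i1) % N] += 1
--     return max(matches)
-- ===== SOURCE B (Python) =====
-- from typing import List
--
-- def maximumMatchingIndices_1(nums1: List[int], nums2: List[int]) -> int:
--     # Directly rescan per shift: after d right shifts, index j of nums2 lines up
--     # with index (j - d) % N of nums1; return the best shift's match count.
--     N = len(nums1)
--     return max(
--         sum(1 for j, v in enumerate(nums2) if v == nums1[(j - d) % N])
--         for d in range(N)
--     )
-- ===== Notes on version B (the rewrite author's own statement) =====
-- stated objective: simpler
-- what changed: A groups indices by value into two defaultdicts and accumulates a histogram of index differences (i2-i1) mod N over all equal-value pairs; B drops the dicts and histogram entirely and directly rescans the arrays once per shift d, counting indices j with nums2[j] == nums1[(j-d) % N], and takes the max.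
import Mathlib
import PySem

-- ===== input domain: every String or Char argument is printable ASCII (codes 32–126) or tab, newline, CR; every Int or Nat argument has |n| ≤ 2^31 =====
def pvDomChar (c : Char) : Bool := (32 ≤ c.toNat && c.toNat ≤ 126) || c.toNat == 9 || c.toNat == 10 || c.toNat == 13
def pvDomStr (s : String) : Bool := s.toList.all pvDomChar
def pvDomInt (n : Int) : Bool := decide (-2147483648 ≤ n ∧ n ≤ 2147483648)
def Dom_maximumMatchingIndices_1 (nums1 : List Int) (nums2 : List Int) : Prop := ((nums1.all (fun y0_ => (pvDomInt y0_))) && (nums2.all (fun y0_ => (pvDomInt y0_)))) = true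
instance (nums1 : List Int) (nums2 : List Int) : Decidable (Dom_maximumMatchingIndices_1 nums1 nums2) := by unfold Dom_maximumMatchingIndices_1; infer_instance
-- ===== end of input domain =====

-- B replaces A's value-grouping difference-histogram by a direct per-shift rescan of the two
-- arrays (for each shift d, count indices j with nums2[j] == nums1[(j-d) % N]); objective: simpler.


-- ===== PORT A =====
-- defaultdict(list) index grouping: indices[v] += [i]  is  d.modify v [] (· ++ [i])
def pvBuildIdx (l : List Int) : PySem.Dict Int (List Int) :=
  (PySem.List.enumerate l 0).foldl (fun d p => d.modify p.2 [] (fun xs => xs ++ [p.1])) PySem.Dict.empty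

def maximumMatchingIndices_1 (nums1 : List Int) (nums2 : List Int) : Int :=
  let indices1 := pvBuildIdx nums1
  let indices2 := pvBuildIdx nums2
  let N : Int := nums1.length
  -- matches = [0 for _ in range(N)], then the triple loop  matches[(i2 - i1) % N] += 1
  let ms := indices1.keys.foldl (fun m num =>
      (indices1.getD num []).foldl (fun m i1 =>
        (indices2.getD num []).foldl (fun m i2 =>
          PySem.List.pySetD m (PySem.Int.mod (i2 - i1) N)
            (PySem.List.pyGetD m (PySem.Int.mod (i2 - i1) N) 0 + 1)) m) m)
    ((PySem.List.pyRange 0 N 1).map (fun _ => (0 : Int)))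
  -- max(matches); the ValueError on an empty matches list is excluded by Pre_
  (PySem.List.max? ms (fun x => x)).getD 0

-- ===== PORT B =====
def maximumMatchingIndices_1_alt (nums1 : List Int) (nums2 : List Int) : Int :=
  let N : Int := nums1.length
  let counts := (PySem.List.pyRange 0 N 1).map (fun d =>
    ((PySem.List.enumerate nums2 0).map (fun p =>
      if PySem.List.pyGetD nums1 (PySem.Int.mod (p.1 - d) N) 0 == p.2 then (1 : Int) else 0)).sum)
  (PySem.List.max? counts (fun x => x)).getD 0

-- ===== PRECONDITION & SPEC =====
-- Pre_ excludes only nums1 = [], where Python A raises ValueError (max of an empty list; B raises there too).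
def Pre_maximumMatchingIndices_1 (nums1 : List Int) (nums2 : List Int) : Prop := nums1 ≠ []
instance (nums1 : List Int) (nums2 : List Int) : Decidable (Pre_maximumMatchingIndices_1 nums1 nums2) := by unfold Pre_maximumMatchingIndices_1; infer_instance
def pvWitness_maximumMatchingIndices_1 : List Int × List Int := ([1, 2, 1], [1, 1, 2])

def Spec_maximumMatchingIndices_1 (nums1 : List Int) (nums2 : List Int) (out : Int) : Prop := out = maximumMatchingIndices_1_alt nums1 nums2
instance (nums1 : List Int) (nums2 : List Int) (out : Int) : Decidable (Spec_maximumMatchingIndices_1 nums1 nums2 out) := by unfold Spec_maximumMatchingIndices_1; infer_instance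

-- ===== CLAIM (what is proved, stated in full; the proofs are below) =====
def Claim_equal_maximumMatchingIndices_1 : Prop := ∀ (nums1 : List Int) (nums2 : List Int), Dom_maximumMatchingIndices_1 nums1 nums2 → Pre_maximumMatchingIndices_1 nums1 nums2 → Spec_maximumMatchingIndices_1 nums1 nums2 (maximumMatchingIndices_1 nums1 nums2)

-- ===== LEMMAS AND PROOFS =====

-- the positions of value v in l, exactly as A's dict stores them
def pvPos (l : List Int) (v : Int) : List Int :=
  ((PySem.List.enumerate l 0).filter (fun p => p.2 == v)).map (fun p => p.1)

-- one  matches[e] += 1  step of A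
def pvIncr (m : List Int) (e : Int) : List Int :=
  PySem.List.pySetD m e (PySem.List.pyGetD m e 0 + 1)

-- the flattened stream of indices A's triple loop increments
def pvE (nums1 nums2 : List Int) : List Int :=
  (PySem.Set.ofList nums1).flatMap (fun v =>
    (pvPos nums1 v).flatMap (fun i1 =>
      (pvPos nums2 v).map (fun i2 => PySem.Int.mod (i2 - i1) (nums1.length : Int))))

-- B's count for shift d
def pvCnt (nums1 nums2 : List Int) (d : Int) : Int :=
  ((PySem.List.enumerate nums2 0).map (fun p =>
    if PySem.List.pyGetD nums1 (PySem.Int.mod (p.1 - d) (nums1.length : Int)) 0 == p.2 then (1 : Int) else 0)).sum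

lemma pvBuildIdx_getD (l : List Int) (v : Int) : (pvBuildIdx l).getD v [] = pvPos l v := by
  unfold pvBuildIdx pvPos
  rw [show (PySem.List.enumerate l 0).foldl (fun d p => d.modify p.2 [] (fun xs => xs ++ [p.1])) PySem.Dict.empty
       = ((PySem.List.enumerate l 0).map Prod.swap).foldl (fun d p => d.modify p.1 [] (fun xs => xs ++ [p.2])) PySem.Dict.empty
     from by rw [List.foldl_map]; simp [Prod.swap]]
  rw [PySem.Dict.getD_foldl_modify_append]
  simp only [PySem.Dict.getD_empty, List.filter_map, List.map_map, List.nil_append]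
  congr 1

lemma pvBuildIdx_keys (l : List Int) : (pvBuildIdx l).keys = PySem.Set.ofList l := by
  unfold pvBuildIdx
  rw [PySem.Dict.keys_foldl_modify_key]
  simp [PySem.List.map_snd_enumerate, PySem.Dict.keys_empty, PySem.Set.update_nil_left]

lemma pvPos_mem (l : List Int) (v j : Int) :
    j ∈ pvPos l v ↔ 0 ≤ j ∧ j.toNat < l.length ∧ l[j.toNat]? = some v := by
  unfold pvPos
  simp only [List.mem_map, List.mem_filter, PySem.List.mem_enumerate_iff]
  constructor
  · rintro ⟨p, ⟨⟨k, hk, rfl⟩, hpv⟩, rfl⟩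
    simp only [beq_iff_eq] at hpv
    refine ⟨by omega, by simpa using hk, ?_⟩
    rw [show ((0:Int) + k).toNat = k by omega]
    simp [List.getElem?_eq_getElem hk, hpv]
  · rintro ⟨h0, hlt, hget⟩
    obtain ⟨h', hv⟩ := List.getElem?_eq_some_iff.mp hget
    refine ⟨(j, v), ⟨⟨j.toNat, hlt, ?_⟩, by simp⟩, rfl⟩
    rw [← hv]; simp; omega

lemma pvPos_nodup (l : List Int) (v : Int) : (pvPos l v).Nodup := by
  unfold pvPos
  have h1 := PySem.List.pairwise_lt_enumerate (xs := l) (s := 0)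
  have h2 := h1.filter (fun p => p.2 == v)
  have h3 : (((PySem.List.enumerate l 0).filter (fun p => p.2 == v)).map (fun p => p.1)).Pairwise (· < ·) :=
    List.pairwise_map.mpr h2
  exact h3.imp (fun h => ne_of_lt h)

lemma pvFold_flatten (nums1 nums2 : List Int) (m0 : List Int) :
    (pvBuildIdx nums1).keys.foldl (fun m num =>
      ((pvBuildIdx nums1).getD num []).foldl (fun m i1 =>
        ((pvBuildIdx nums2).getD num []).foldl (fun m i2 =>
          PySem.List.pySetD m (PySem.Int.mod (i2 - i1) (nums1.length : Int))
            (PySem.List.pyGetD m (PySem.Int.mod (i2 - i1) (nums1.length : Int)) 0 + 1)) m) m) m0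
    = (pvE nums1 nums2).foldl pvIncr m0 := by
  unfold pvE
  simp only [pvBuildIdx_getD, pvBuildIdx_keys]
  rw [List.foldl_flatMap]
  apply PySem.List.foldl_congr_mem
  intro acc v _
  rw [List.foldl_flatMap]
  apply PySem.List.foldl_congr_mem
  intro acc2 i1 _
  rw [List.foldl_map]
  rfl

lemma pvFold_incr_length (E : List Int) : ∀ (m : List Int), (∀ e ∈ E, 0 ≤ e ∧ e.toNat < m.length) →
    (E.foldl pvIncr m).length = m.length := by
  induction E with
  | nil => intro m _; rfl
  | cons e t ih =>
    intro m hE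
    obtain ⟨h0, hl⟩ := hE e (by simp)
    simp only [List.foldl_cons]
    rw [show pvIncr m e = m.set e.toNat (PySem.List.pyGetD m e 0 + 1) from
      PySem.List.pySetD_of_nonneg m _ h0]
    rw [ih _ (by intro x hx; simpa using (hE x (by simp [hx])))]
    simp

lemma pvFold_incr_get (E : List Int) : ∀ (m : List Int), (∀ e ∈ E, 0 ≤ e ∧ e.toNat < m.length) →
    ∀ (k : Nat) (hk : k < (E.foldl pvIncr m).length) (hk' : k < m.length),
    (E.foldl pvIncr m)[k] = m[k] + (E.count (k : Int) : Int) := by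
  induction E with
  | nil => intro m _ k hk hk'; simp
  | cons e t ih =>
    intro m hE k hk hk'
    obtain ⟨h0, hl⟩ := hE e (by simp)
    have hset : pvIncr m e = m.set e.toNat (PySem.List.pyGetD m e 0 + 1) :=
      PySem.List.pySetD_of_nonneg m _ h0
    have hlen : (pvIncr m e).length = m.length := by rw [hset]; simp
    have ht : ∀ x ∈ t, 0 ≤ x ∧ x.toNat < (pvIncr m e).length := by
      intro x hx; rw [hlen]; exact hE x (by simp [hx])
    simp only [List.foldl_cons]
    rw [ih _ ht k (by simpa [List.foldl_cons] using hk) (by omega)]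
    simp only [hset, List.getElem_set]
    have hgd : PySem.List.pyGetD m e 0 = m[e.toNat]'hl := PySem.List.pyGetD_eq_getElem m 0 h0 (by omega)
    rw [List.count_cons]
    by_cases he : e = (k:Int)
    · have : e.toNat = k := by omega
      simp [this, he, hgd, List.getElem?_eq_getElem hk']
      ring
    · have : e.toNat ≠ k := by omega
      simp [this, he]

lemma pvCountFlat {α : Type} (l : List α) (g : α → List Int) (a : Int) :
    (l.flatMap g).count a = (l.map (fun x => (g x).count a)).sum := by
  induction l with
  | nil => simp
  | cons x t ih => simp [List.count_append, ih]

lemma pvCountMap {α : Type} (l : List α) (g : α → Int) (a : Int) :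
    (l.map g).count a = l.countP (fun x => g x == a) := by
  simp [List.count, List.countP_map]; rfl

lemma pvModShift (N i1 d i2 : Int) (hN : 0 < N) (h1 : 0 ≤ i1) (h1' : i1 < N)
    (hd : 0 ≤ d) (hd' : d < N) :
    (PySem.Int.mod (i2 - i1) N == d) = (PySem.Int.mod (i2 - d) N == i1) := by
  rw [PySem.Int.mod_eq_emod_of_pos hN, PySem.Int.mod_eq_emod_of_pos hN]
  have key : ∀ a b : Int, (a - (a - b) % N) % N = b % N := by
    intro a b
    conv_lhs => rw [Int.sub_emod]
    rw [Int.emod_emod_of_dvd _ (dvd_refl N)]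
    rw [← Int.sub_emod]
    simp
  by_cases h : (i2 - i1) % N = d
  · have : (i2 - d) % N = i1 := by
      rw [← h, key i2 i1, Int.emod_eq_of_lt h1 h1']
    simp [h, this]
  · have : (i2 - d) % N ≠ i1 := by
      intro hc
      apply h
      rw [← hc, key i2 d, Int.emod_eq_of_lt hd hd']
    simp [h, this]

lemma pvSwap (l1 l2 : List Int) (h : Int → Int) :
    (l1.map (fun a => l2.countP (fun b => h b == a))).sum = (l2.map (fun b => l1.count (h b))).sum := by
  induction l1 with
  | nil => simp
  | cons a t ih =>
    simp only [List.map_cons, List.sum_cons, ih]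
    rw [show (fun b => (a :: t).count (h b)) = (fun b => t.count (h b) + if h b == a then 1 else 0) from ?_]
    · rw [List.sum_map_add]
      rw [PySem.List.sum_map_ite_one_zero_nat]
      ring
    · funext b
      rw [List.count_cons]
      by_cases hba : h b = a
      · simp [hba]
      · simp [hba, Ne.symm hba]

lemma pvDistinctSum (keys : List Int) (L : List (Int × Int)) (C : Int × Int → Bool) (hnd : keys.Nodup) :
    (keys.map (fun v => L.countP (fun p => (p.2 == v) && C p))).sum
      = L.countP (fun p => decide (p.2 ∈ keys) && C p) := by
  induction L with
  | nil => simp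
  | cons q t ih =>
    simp only [List.countP_cons]
    rw [show (fun v => t.countP (fun p => (p.2 == v) && C p) + if (q.2 == v) && C q then 1 else 0)
          = (fun v => t.countP (fun p => (p.2 == v) && C p) + (if (q.2 == v) && C q then 1 else 0)) from rfl]
    rw [List.sum_map_add, ih]
    congr 1
    rw [PySem.List.sum_map_ite_one_zero_nat]
    by_cases hc : C q
    · have : (fun v => (q.2 == v) && C q) = (fun v => v == q.2) := by
        funext v; simp [hc, eq_comm]
      rw [this]
      have : keys.countP (fun v => v == q.2) = keys.count q.2 := rfl
      rw [this]
      by_cases hm : q.2 ∈ keys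
      · simp [hm, hc, List.count_eq_one_of_mem hnd hm]
      · simp [hm, hc, List.count_eq_zero_of_not_mem hm]
    · simp [hc]

lemma pvE_bounds (nums1 nums2 : List Int) (h : nums1 ≠ []) :
    ∀ e ∈ pvE nums1 nums2, 0 ≤ e ∧ e.toNat < nums1.length := by
  have hN : (0:Int) < (nums1.length : Int) := by
    simp [List.length_pos_iff]; exact h
  intro e he
  unfold pvE at he
  simp only [List.mem_flatMap, List.mem_map] at he
  obtain ⟨v, -, i1, -, i2, -, rfl⟩ := he
  have h0 := PySem.Int.mod_nonneg (i2 - i1) hN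
  have h1 := PySem.Int.mod_lt (i2 - i1) hN
  constructor
  · exact h0
  · omega

lemma pvE_count (nums1 nums2 : List Int) (h : nums1 ≠ []) (d : Int) (hd0 : 0 ≤ d)
    (hdN : d < (nums1.length : Int)) :
    (((pvE nums1 nums2).count d : Nat) : Int) = pvCnt nums1 nums2 d := by
  have hN : (0:Int) < (nums1.length : Int) := by
    simp [List.length_pos_iff]; exact h
  set N : Int := (nums1.length : Int) with hNdef
  set hfun : Int → Int := fun i2 => PySem.Int.mod (i2 - d) N with hh
  set C : Int × Int → Bool := fun p => PySem.List.pyGetD nums1 (hfun p.1) 0 == p.2 with hC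
  -- the count of d in the flattened stream, summed per distinct value of nums1
  have step1 : (pvE nums1 nums2).count d
      = ((PySem.Set.ofList nums1).map (fun v =>
          ((pvPos nums2 v).map (fun i2 => if PySem.List.pyGetD nums1 (hfun i2) 0 == v then (1:Nat) else 0)).sum)).sum := by
    unfold pvE
    rw [pvCountFlat]
    congr 1
    apply List.map_congr_left
    intro v hv
    rw [pvCountFlat]
    rw [show (fun i1 => ((pvPos nums2 v).map (fun i2 => PySem.Int.mod (i2 - i1) N)).count d)
          = (fun i1 => (pvPos nums2 v).countP (fun i2 => PySem.Int.mod (i2 - i1) N == d)) from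
      funext (fun i1 => pvCountMap _ _ _)]
    rw [List.map_congr_left (fun i1 hi1 => by
      have hb := (pvPos_mem nums1 v i1).mp hi1
      exact List.countP_congr (fun i2 _ => by
        rw [pvModShift N i1 d i2 hN hb.1 (by omega) hd0 hdN]))]
    rw [pvSwap]
    congr 1
    apply List.map_congr_left
    intro i2 _
    have hb0 : 0 ≤ hfun i2 := PySem.Int.mod_nonneg (i2 - d) hN
    have hb1 : hfun i2 < N := PySem.Int.mod_lt (i2 - d) hN
    by_cases hmem : hfun i2 ∈ pvPos nums1 v
    · have hv' := (pvPos_mem nums1 v (hfun i2)).mp hmem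
      have : PySem.List.pyGetD nums1 (hfun i2) 0 = v := by
        rw [PySem.List.pyGetD_eq_getElem nums1 0 hb0 (by omega)]
        have := hv'.2.2
        rw [List.getElem?_eq_getElem hv'.2.1] at this
        exact Option.some_injective _ this
      rw [List.count_eq_one_of_mem (pvPos_nodup nums1 v) hmem]
      simp [this]
    · have : ¬ (PySem.List.pyGetD nums1 (hfun i2) 0 = v) := by
        intro hc
        apply hmem
        rw [pvPos_mem]
        refine ⟨hb0, by omega, ?_⟩
        rw [← hc, PySem.List.pyGetD_eq_getElem nums1 0 hb0 (by omega)]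
        exact List.getElem?_eq_getElem _
      rw [List.count_eq_zero_of_not_mem hmem]
      simp [this]
  -- the per-value sum as a countP over enumerate(nums2)
  have step2 : ∀ v : Int,
      ((pvPos nums2 v).map (fun i2 => if PySem.List.pyGetD nums1 (hfun i2) 0 == v then (1:Nat) else 0)).sum
      = (PySem.List.enumerate nums2 0).countP (fun p => (p.2 == v) && C p) := by
    intro v
    rw [PySem.List.sum_map_ite_one_zero_nat]
    unfold pvPos
    rw [List.countP_map, List.countP_filter]
    apply List.countP_congr
    intro p hp
    simp only [Function.comp]
    by_cases h2 : p.2 = v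
    · subst h2; simp [hC, Bool.and_comm]
    · simp [h2]
  have step3 : (pvE nums1 nums2).count d
      = (PySem.List.enumerate nums2 0).countP C := by
    rw [step1]
    rw [List.map_congr_left (fun v _ => step2 v)]
    rw [pvDistinctSum _ _ _ (PySem.Set.nodup_ofList nums1)]
    apply List.countP_congr
    intro p hp
    by_cases hc : C p
    · have hb0 : 0 ≤ hfun p.1 := PySem.Int.mod_nonneg (p.1 - d) hN
      have hb1 : hfun p.1 < N := PySem.Int.mod_lt (p.1 - d) hN
      have hmem : p.2 ∈ nums1 := by
        rw [hC] at hc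
        simp only [beq_iff_eq] at hc
        rw [← hc, PySem.List.pyGetD_eq_getElem nums1 0 hb0 (by omega)]
        exact List.getElem_mem _
      simp [hc, (PySem.Set.mem_ofList nums1 p.2).mpr hmem]
    · simp [hc]
  rw [step3]
  unfold pvCnt
  rw [PySem.List.sum_map_ite_one_zero]

-- ===== VERDICT (by name: the statement is the Claim_ definition above) =====
theorem maximumMatchingIndices_1_spec : Claim_equal_maximumMatchingIndices_1 := by
  intro nums1 nums2 _ hpre
  unfold Spec_maximumMatchingIndices_1
  unfold Pre_maximumMatchingIndices_1 at hpre
  have hN : (0:Int) < (nums1.length : Int) := by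
    simp [List.length_pos_iff]; exact hpre
  simp only [maximumMatchingIndices_1, maximumMatchingIndices_1_alt]
  rw [pvFold_flatten]
  set m0 : List Int := (PySem.List.pyRange 0 (nums1.length : Int) 1).map (fun _ => (0 : Int)) with hm0
  have hm0len : m0.length = nums1.length := by
    rw [hm0]; simp [PySem.List.length_pyRange_one]
  have hEb : ∀ e ∈ pvE nums1 nums2, 0 ≤ e ∧ e.toNat < m0.length := by
    rw [hm0len]; exact pvE_bounds nums1 nums2 hpre
  have hlen : ((pvE nums1 nums2).foldl pvIncr m0).length = m0.length :=
    pvFold_incr_length _ _ hEb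
  have hms : (pvE nums1 nums2).foldl pvIncr m0
      = (PySem.List.pyRange 0 (nums1.length : Int) 1).map (pvCnt nums1 nums2) := by
    apply List.ext_getElem
    · rw [hlen, hm0len]
      simp [PySem.List.length_pyRange_one]
    · intro k hk hk2
      rw [pvFold_incr_get _ _ hEb k hk (by omega)]
      have hkN : k < nums1.length := by
        rw [← hm0len]; omega
      have hm0k : m0[k]'(by omega) = 0 := by
        simp [hm0]
      rw [hm0k]
      rw [pvE_count nums1 nums2 hpre (k : Int) (by omega) (by exact_mod_cast hkN)]
      rw [List.getElem_map, PySem.List.getElem_pyRange_one]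
      rw [show (0 : Int) + (k : Nat) = (k : Int) by omega]
      ring
  rw [hms]
  rfl
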